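-- pv_equiv track=rewrite | github.com/TianleiP/ML_Project_311 | helper_files/combine_drinks.py | normalize_drink_name
-- ===== SOURCE A (Python) =====
-- def normalize_drink_name(drink):
--     """Normalize drink names by combining similar terms."""
--     drink = drink.lower().strip()
--
--     # Define groups of similar drinks
--     drink_groups = {
--         'coca cola': ['coke', 'coca cola', 'diet coke', 'cola', 'coke zero', 'pepsi', 'diet pepsi'],
--         'tea': ['tea', 'green tea', 'iced tea', 'ice tea', 'bubble tea', 'milk tea'],
--         'water': ['water', 'sparkling water', 'mineral water', 'soda water'],
--         'beer': ['beer', 'craft beer', 'cold beer'],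
--         'juice': ['juice', 'orange juice', 'apple juice', 'fruit juice', 'lemon juice'],
--         'soda': ['soda', 'pop', 'soft drink', 'carbonated drink', 'sprite', 'fanta', '7up', 'mountain dew'],
--         'wine': ['wine', 'red wine', 'white wine', 'rose wine'],
--         'coffee': ['coffee', 'iced coffee', 'espresso', 'latte'],
--         'milk': ['milk', 'chocolate milk', 'dairy']
--     }
--
--     # Check each group for matches
--     for main_term, variants in drink_groups.items():
--         if any(variant == drink or variant in drink.split() for variant in variants):
--             return main_term
--
--     return drink
-- ===== SOURCE B (Python) =====
-- # Flat reverse-lookup table written out once: variant -> (group priority, canonical term).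
-- _LOOKUP = {
--     'coke': (0, 'coca cola'),
--     'coca cola': (0, 'coca cola'),
--     'diet coke': (0, 'coca cola'),
--     'cola': (0, 'coca cola'),
--     'coke zero': (0, 'coca cola'),
--     'pepsi': (0, 'coca cola'),
--     'diet pepsi': (0, 'coca cola'),
--     'tea': (1, 'tea'),
--     'green tea': (1, 'tea'),
--     'iced tea': (1, 'tea'),
--     'ice tea': (1, 'tea'),
--     'bubble tea': (1, 'tea'),
--     'milk tea': (1, 'tea'),
--     'water': (2, 'water'),
--     'sparkling water': (2, 'water'),
--     'mineral water': (2, 'water'),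
--     'soda water': (2, 'water'),
--     'beer': (3, 'beer'),
--     'craft beer': (3, 'beer'),
--     'cold beer': (3, 'beer'),
--     'juice': (4, 'juice'),
--     'orange juice': (4, 'juice'),
--     'apple juice': (4, 'juice'),
--     'fruit juice': (4, 'juice'),
--     'lemon juice': (4, 'juice'),
--     'soda': (5, 'soda'),
--     'pop': (5, 'soda'),
--     'soft drink': (5, 'soda'),
--     'carbonated drink': (5, 'soda'),
--     'sprite': (5, 'soda'),
--     'fanta': (5, 'soda'),
--     '7up': (5, 'soda'),
--     'mountain dew': (5, 'soda'),
--     'wine': (6, 'wine'),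
--     'red wine': (6, 'wine'),
--     'white wine': (6, 'wine'),
--     'rose wine': (6, 'wine'),
--     'coffee': (7, 'coffee'),
--     'iced coffee': (7, 'coffee'),
--     'espresso': (7, 'coffee'),
--     'latte': (7, 'coffee'),
--     'milk': (8, 'milk'),
--     'chocolate milk': (8, 'milk'),
--     'dairy': (8, 'milk'),
-- }
--
--
-- def normalize_drink_name(drink):
--     """Normalize drink names by combining similar terms."""
--     drink = drink.lower().strip()
--     hits = [_LOOKUP[k] for k in [drink] + drink.split() if k in _LOOKUP]
--     if hits:
--         return min(hits, key=lambda t: t[0])[1]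
--     return drink
-- ===== Notes on version B (the rewrite author's own statement) =====
-- stated objective: faster
-- what changed: Replaces A's in-order scan of nine variant groups (testing each variant against the string and its words) by a flat precomputed reverse-lookup dict variant->(priority, main term): collect the hits for the full string and each word with a comprehension, then return the main term of the minimum-priority hit; per call this is O(words) dict lookups instead of comparing all 44 variants.
import Mathlib
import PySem

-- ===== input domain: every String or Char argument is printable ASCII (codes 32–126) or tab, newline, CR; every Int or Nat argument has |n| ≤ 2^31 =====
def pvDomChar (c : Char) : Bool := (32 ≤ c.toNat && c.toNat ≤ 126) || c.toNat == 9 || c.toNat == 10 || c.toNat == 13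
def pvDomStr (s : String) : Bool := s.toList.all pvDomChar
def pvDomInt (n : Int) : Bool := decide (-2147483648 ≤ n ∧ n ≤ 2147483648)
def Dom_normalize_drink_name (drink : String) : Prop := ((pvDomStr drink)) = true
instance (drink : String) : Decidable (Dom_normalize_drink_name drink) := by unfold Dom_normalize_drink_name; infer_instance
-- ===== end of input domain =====

set_option maxRecDepth 100000

-- B replaces A's in-order group scan by a flat reverse-lookup dict variant -> (priority, main);
-- it collects the hits for the string and its words and returns the minimum-priority one.

-- ===== PORT A =====
def pvDrinkGroups : List (String × List String) :=
  [("coca cola", ["coke", "coca cola", "diet coke", "cola", "coke zero", "pepsi", "diet pepsi"]),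
   ("tea", ["tea", "green tea", "iced tea", "ice tea", "bubble tea", "milk tea"]),
   ("water", ["water", "sparkling water", "mineral water", "soda water"]),
   ("beer", ["beer", "craft beer", "cold beer"]),
   ("juice", ["juice", "orange juice", "apple juice", "fruit juice", "lemon juice"]),
   ("soda", ["soda", "pop", "soft drink", "carbonated drink", "sprite", "fanta", "7up", "mountain dew"]),
   ("wine", ["wine", "red wine", "white wine", "rose wine"]),
   ("coffee", ["coffee", "iced coffee", "espresso", "latte"]),
   ("milk", ["milk", "chocolate milk", "dairy"])]

def normalize_drink_name (drink : String) : String :=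
  let d := PySem.Str.strip (PySem.Str.lower drink)
  match pvDrinkGroups.find?
      (fun g => g.2.any (fun v => v == d || (PySem.Str.split₀ d).contains v)) with
  | some g => g.1
  | none => d

-- ===== PORT B =====
-- Source B's module-level dict literal _LOOKUP (all 44 keys distinct)
def pvLookup : PySem.Dict String (Int × String) :=
  PySem.Dict.mk
    [("coke", (0, "coca cola")), ("coca cola", (0, "coca cola")), ("diet coke", (0, "coca cola")),
     ("cola", (0, "coca cola")), ("coke zero", (0, "coca cola")), ("pepsi", (0, "coca cola")),
     ("diet pepsi", (0, "coca cola")),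
     ("tea", (1, "tea")), ("green tea", (1, "tea")), ("iced tea", (1, "tea")),
     ("ice tea", (1, "tea")), ("bubble tea", (1, "tea")), ("milk tea", (1, "tea")),
     ("water", (2, "water")), ("sparkling water", (2, "water")), ("mineral water", (2, "water")),
     ("soda water", (2, "water")),
     ("beer", (3, "beer")), ("craft beer", (3, "beer")), ("cold beer", (3, "beer")),
     ("juice", (4, "juice")), ("orange juice", (4, "juice")), ("apple juice", (4, "juice")),
     ("fruit juice", (4, "juice")), ("lemon juice", (4, "juice")),
     ("soda", (5, "soda")), ("pop", (5, "soda")), ("soft drink", (5, "soda")),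
     ("carbonated drink", (5, "soda")), ("sprite", (5, "soda")), ("fanta", (5, "soda")),
     ("7up", (5, "soda")), ("mountain dew", (5, "soda")),
     ("wine", (6, "wine")), ("red wine", (6, "wine")), ("white wine", (6, "wine")),
     ("rose wine", (6, "wine")),
     ("coffee", (7, "coffee")), ("iced coffee", (7, "coffee")), ("espresso", (7, "coffee")),
     ("latte", (7, "coffee")),
     ("milk", (8, "milk")), ("chocolate milk", (8, "milk")), ("dairy", (8, "milk"))]

def normalize_drink_name_alt (drink : String) : String :=
  let d := PySem.Str.strip (PySem.Str.lower drink)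
  -- hits = [_LOOKUP[k] for k in [d] + d.split() if k in _LOOKUP]
  let hits := ([d] ++ PySem.Str.split₀ d).filterMap (fun k => pvLookup.get? k)
  -- min(hits, key=lambda t: t[0])[1] : Python min keeps the FIRST minimum
  match hits with
  | [] => d
  | x :: xs => (xs.foldl (fun b h => if h.1 < b.1 then h else b) x).2

-- ===== PRECONDITION & SPEC =====
def Spec_normalize_drink_name (drink : String) (out : String) : Prop := out = normalize_drink_name_alt drink
instance (drink : String) (out : String) : Decidable (Spec_normalize_drink_name drink out) := by unfold Spec_normalize_drink_name; infer_instance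

-- ===== CLAIM (what is proved, stated in full; the proofs are below) =====
def Claim_equal_normalize_drink_name : Prop := ∀ (drink : String), Dom_normalize_drink_name drink → Spec_normalize_drink_name drink (normalize_drink_name drink)

-- ===== LEMMAS AND PROOFS =====

-- left-biased min-by-priority merge of optional hits
def pvMerge (a b : Option (Int × String)) : Option (Int × String) :=
  match b with
  | none => a
  | some h =>
    match a with
    | none => some h
    | some x => if h.1 < x.1 then some h else some x

def pvG (k : String) : Option (Int × String) := pvLookup.get? k

-- A's nine groups, each paired with its (priority, main term)
def pvT : List ((Int × String) × List String) :=
  [((0, "coca cola"), ["coke", "coca cola", "diet coke", "cola", "coke zero", "pepsi", "diet pepsi"]),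
   ((1, "tea"), ["tea", "green tea", "iced tea", "ice tea", "bubble tea", "milk tea"]),
   ((2, "water"), ["water", "sparkling water", "mineral water", "soda water"]),
   ((3, "beer"), ["beer", "craft beer", "cold beer"]),
   ((4, "juice"), ["juice", "orange juice", "apple juice", "fruit juice", "lemon juice"]),
   ((5, "soda"), ["soda", "pop", "soft drink", "carbonated drink", "sprite", "fanta", "7up", "mountain dew"]),
   ((6, "wine"), ["wine", "red wine", "white wine", "rose wine"]),
   ((7, "coffee"), ["coffee", "iced coffee", "espresso", "latte"]),
   ((8, "milk"), ["milk", "chocolate milk", "dairy"])]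

-- first group whose variant list contains the single key k
def pickS (k : String) : List ((Int × String) × List String) → Option (Int × String)
  | [] => none
  | e :: l => if e.2.contains k then some e.1 else pickS k l

-- first group hit by any of the keys (A's scan, abstracted over the group list)
def pickT (keys : List String) : List ((Int × String) × List String) → Option (Int × String)
  | [] => none
  | e :: l => if e.2.any (fun v => keys.contains v) then some e.1 else pickT keys l

lemma pvMerge_assoc (a b c : Option (Int × String)) :
    pvMerge (pvMerge a b) c = pvMerge a (pvMerge b c) := by
  rcases a with _ | a <;> rcases b with _ | b <;> rcases c with _ | c <;> (try rfl)
  · by_cases h2 : c.1 < b.1 <;> simp [pvMerge, h2]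
  · by_cases h1 : b.1 < a.1 <;> by_cases h2 : c.1 < b.1 <;> by_cases h3 : c.1 < a.1 <;>
      simp [pvMerge, h1, h2, h3] <;> (exfalso; omega)

lemma pvMerge_none_left (b : Option (Int × String)) : pvMerge none b = b := by
  cases b <;> rfl

lemma pvRun_foldl (ks : List String) (a : Option (Int × String)) :
    ks.foldl (fun b k => pvMerge b (pvG k)) a
      = pvMerge a (ks.foldl (fun b k => pvMerge b (pvG k)) none) := by
  induction ks generalizing a with
  | nil => cases a <;> rfl
  | cons k ks ih =>
    show List.foldl _ (pvMerge a (pvG k)) ks = _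
    rw [ih (pvMerge a (pvG k)), List.foldl_cons, ih (pvMerge none (pvG k)),
      pvMerge_none_left, pvMerge_assoc]

lemma pvAny_contains_cons (l : List String) (k : String) (rest : List String) :
    (l.any fun v => (k :: rest).contains v)
      = (l.contains k || l.any fun v => rest.contains v) := by
  apply Bool.eq_iff_iff.mpr
  simp [List.any_eq_true, List.mem_cons]
  aesop

lemma pickT_nil (l : List ((Int × String) × List String)) : pickT [] l = none := by
  induction l with
  | nil => rfl
  | cons e l ih => simp [pickT, ih]

lemma pickS_mem (k : String) (l : List ((Int × String) × List String)) (q : Int × String)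
    (h : pickS k l = some q) : q ∈ l.map (·.1) := by
  induction l with
  | nil => simp [pickS] at h
  | cons e l ih =>
    simp only [pickS] at h
    split_ifs at h with hc
    · simp_all
    · simp [List.map_cons, List.mem_cons, ih h]

lemma pickT_mem (ks : List String) (l : List ((Int × String) × List String)) (q : Int × String)
    (h : pickT ks l = some q) : q ∈ l.map (·.1) := by
  induction l with
  | nil => simp [pickT] at h
  | cons e l ih =>
    simp only [pickT] at h
    split_ifs at h with hc
    · simp_all
    · simp [List.map_cons, List.mem_cons, ih h]

-- the key step: merging one key's first-group hit into the scan over the remaining keys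
lemma pvKey_step (l : List ((Int × String) × List String))
    (hs : l.Pairwise (fun e f => e.1.1 < f.1.1)) (k : String) (ks : List String) :
    pvMerge (pickS k l) (pickT ks l) = pickT (k :: ks) l := by
  induction l with
  | nil => rfl
  | cons e l ih =>
    rcases List.pairwise_cons.mp hs with ⟨hlt, hs'⟩
    simp only [pickS, pickT, pvAny_contains_cons]
    by_cases hk : e.2.contains k = true
    · rw [if_pos hk, if_pos (show (e.2.contains k || e.2.any fun v => ks.contains v) = true by
        simp only [hk, Bool.true_or])]
      by_cases hA : (e.2.any fun v => ks.contains v) = true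
      · rw [if_pos hA]; simp [pvMerge]
      · rw [if_neg hA]
        cases hq : pickT ks l with
        | none => rfl
        | some q =>
          rcases List.mem_map.mp (pickT_mem ks l q hq) with ⟨f, hf, hfq⟩
          have hq1 : e.1.1 < q.1 := hfq ▸ hlt f hf
          simp [pvMerge, show ¬(q.1 < e.1.1) by omega]
    · have hk' : e.2.contains k = false := by simpa using hk
      rw [if_neg hk]
      by_cases hA : (e.2.any fun v => ks.contains v) = true
      · rw [if_pos hA, if_pos (show (e.2.contains k || e.2.any fun v => ks.contains v) = true by
          simp only [hA, Bool.or_true])]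
        cases hq : pickS k l with
        | none => simp [pvMerge]
        | some q =>
          rcases List.mem_map.mp (pickS_mem k l q hq) with ⟨f, hf, hfq⟩
          have hq1 : e.1.1 < q.1 := hfq ▸ hlt f hf
          simp [pvMerge, hq1]
      · rw [if_neg hA, if_neg (show ¬((e.2.contains k || e.2.any fun v => ks.contains v) = true) by
          simp only [hk', Bool.false_or]; exact hA)]
        exact ih hs'

-- B's flat dict answers exactly the first-group scan for one key
lemma pvGet_flat (l : List ((Int × String) × List String)) (k : String) :
    (PySem.Dict.mk (l.flatMap fun e => e.2.map fun v => (v, e.1))).get? k = pickS k l := by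
  induction l with
  | nil => rfl
  | cons e l ih =>
    simp only [List.flatMap_cons, pickS]
    have inner : ∀ (vs : List String) (p : Int × String) (rest : List (String × (Int × String))),
        (PySem.Dict.mk (vs.map (fun v => (v, p)) ++ rest)).get? k
          = if vs.contains k then some p else (PySem.Dict.mk rest).get? k := by
      intro vs p rest
      induction vs with
      | nil => simp
      | cons v vs ihv =>
        simp only [List.map_cons, List.cons_append, PySem.Dict.get?_mk_cons, ihv,
          List.contains_cons]
        by_cases hv : v = k
        · subst hv; simp
        · have h1 : (v == k) = false := by simp [hv]
          have h2 : (k == v) = false := by simp [Ne.symm hv]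
          simp [h1, h2]
    rw [inner, ih]

lemma pvLookup_flat :
    pvLookup = PySem.Dict.mk (pvT.flatMap fun e => e.2.map fun v => (v, e.1)) := by decide

lemma pvG_eq_pickS (k : String) : pvG k = pickS k pvT := by
  rw [pvG, pvLookup_flat, pvGet_flat]

lemma pvRun_eq_pickT (ks : List String) :
    ks.foldl (fun b k => pvMerge b (pvG k)) none = pickT ks pvT := by
  induction ks with
  | nil => simp [pickT_nil]
  | cons k ks ih =>
    rw [List.foldl_cons, pvRun_foldl, pvMerge_none_left, ih, pvG_eq_pickS]
    exact pvKey_step pvT (by decide) k ks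

-- B's filterMap-then-min equals the merge fold over the keys
lemma pvFilterMap_fold (ks : List String) (a : Option (Int × String)) :
    (ks.filterMap pvG).foldl (fun b h => pvMerge b (some h)) a
      = ks.foldl (fun b k => pvMerge b (pvG k)) a := by
  induction ks generalizing a with
  | nil => rfl
  | cons k ks ih =>
    cases hk : pvG k with
    | none =>
      simp only [List.filterMap_cons, hk, List.foldl_cons]
      exact ih a
    | some h =>
      simp only [List.filterMap_cons, hk, List.foldl_cons]
      exact ih _

lemma pvMin_fold (x : Int × String) (xs : List (Int × String)) :
    xs.foldl (fun b h => pvMerge b (some h)) (some x)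
      = some (xs.foldl (fun b h => if h.1 < b.1 then h else b) x) := by
  induction xs generalizing x with
  | nil => rfl
  | cons h xs ih =>
    simp only [List.foldl_cons]
    rw [show pvMerge (some x) (some h) = some (if h.1 < x.1 then h else x) by
      by_cases hc : h.1 < x.1 <;> simp [pvMerge, hc]]
    exact ih _

lemma pvPred_eq (d : String) (w : List String) :
    (fun g : String × List String => g.2.any fun v => v == d || w.contains v)
      = (fun g : String × List String => g.2.any fun v => (d :: w).contains v) := by
  funext g
  apply Bool.eq_iff_iff.mpr
  simp [List.any_eq_true, List.mem_cons]

lemma pvGroups_eq_map : pvDrinkGroups = pvT.map (fun e => (e.1.2, e.2)) := by decide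

lemma pvFind_bridge (l : List ((Int × String) × List String)) (keys : List String) (dflt : String) :
    (match (l.map fun e => (e.1.2, e.2)).find? (fun g => g.2.any fun v => keys.contains v) with
     | some g => g.1
     | none => dflt)
      = match pickT keys l with
        | some p => p.2
        | none => dflt := by
  induction l with
  | nil => rfl
  | cons e l ih =>
    simp only [List.map_cons, List.find?_cons, pickT]
    cases h : (e.2.any fun v => keys.contains v) with
    | true => simp
    | false => simpa using ih

lemma pvA_eq (s : String) :
    normalize_drink_name s
      = (match pickT (PySem.Str.strip (PySem.Str.lower s)
            :: PySem.Str.split₀ (PySem.Str.strip (PySem.Str.lower s))) pvT with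
         | some p => p.2
         | none => PySem.Str.strip (PySem.Str.lower s)) := by
  simp only [normalize_drink_name]
  rw [pvPred_eq, pvGroups_eq_map, pvFind_bridge]

lemma pvB_eq (s : String) :
    normalize_drink_name_alt s
      = (match pickT (PySem.Str.strip (PySem.Str.lower s)
            :: PySem.Str.split₀ (PySem.Str.strip (PySem.Str.lower s))) pvT with
         | some p => p.2
         | none => PySem.Str.strip (PySem.Str.lower s)) := by
  simp only [normalize_drink_name_alt, List.singleton_append]
  rw [← pvRun_eq_pickT, ← pvFilterMap_fold (_ :: _) none]
  cases hh : ((PySem.Str.strip (PySem.Str.lower s)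
      :: PySem.Str.split₀ (PySem.Str.strip (PySem.Str.lower s))).filterMap
        (fun k => pvLookup.get? k)) with
  | nil =>
    rw [show ((PySem.Str.strip (PySem.Str.lower s)
        :: PySem.Str.split₀ (PySem.Str.strip (PySem.Str.lower s))).filterMap pvG) = [] from hh]
    rfl
  | cons x xs =>
    rw [show ((PySem.Str.strip (PySem.Str.lower s)
        :: PySem.Str.split₀ (PySem.Str.strip (PySem.Str.lower s))).filterMap pvG) = x :: xs
      from hh]
    rw [List.foldl_cons, pvMerge_none_left, pvMin_fold]

-- ===== VERDICT (by name: the statement is the Claim_ definition above) =====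
theorem normalize_drink_name_spec : Claim_equal_normalize_drink_name := by
  intro drink _
  unfold Spec_normalize_drink_name
  rw [pvA_eq, pvB_eq]
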